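-- pv_equiv track=rewrite | github.com/SETI/rms-data-projects | metadata/__init__.py | sclk_format_count
-- ===== SOURCE A (Python) =====
-- def sclk_format_count(fields, format):
--     # Get delimiters
--     delims = [c for c in format if not c.isalnum()] + ['']
--
--     # Get field formats (i.e. field widths)
--     f = "".join([s if s.isalnum() else '/' for s in format])
--     formats = f.split('/')
--     widths = [len(f) for f in formats]
--
--     # Build count string
--     count = ''
--     for delim, width, field in zip(delims, widths, fields):
--         s = f'{field}'
--         count += '0'*(width-len(s)) + s + delim
--
--     return count
-- ===== SOURCE B (Python) =====
-- def sclk_format_count(fields, format):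
--     # Recursive descent: peel one field and one alphanumeric run (plus its
--     # following delimiter) off at each step; no intermediate lists are built.
--     if not fields:
--         return ''
--     i = 0
--     while i < len(format) and format[i].isalnum():
--         i += 1
--     s = f'{fields[0]}'
--     piece = '0' * (i - len(s)) + s
--     if i == len(format):
--         return piece
--     return piece + format[i] + sclk_format_count(fields[1:], format[i + 1:])
-- ===== Notes on version B (the rewrite author's own statement) =====
-- stated objective: simpler
-- what changed: Replaces A's three staged passes over the format string (delimiter comprehension, join/split width computation, concatenation loop over a triple zip) by a direct recursion that at each step peels one field and one alphanumeric run with its trailing delimiter, building no intermediate lists.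
import Mathlib
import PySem

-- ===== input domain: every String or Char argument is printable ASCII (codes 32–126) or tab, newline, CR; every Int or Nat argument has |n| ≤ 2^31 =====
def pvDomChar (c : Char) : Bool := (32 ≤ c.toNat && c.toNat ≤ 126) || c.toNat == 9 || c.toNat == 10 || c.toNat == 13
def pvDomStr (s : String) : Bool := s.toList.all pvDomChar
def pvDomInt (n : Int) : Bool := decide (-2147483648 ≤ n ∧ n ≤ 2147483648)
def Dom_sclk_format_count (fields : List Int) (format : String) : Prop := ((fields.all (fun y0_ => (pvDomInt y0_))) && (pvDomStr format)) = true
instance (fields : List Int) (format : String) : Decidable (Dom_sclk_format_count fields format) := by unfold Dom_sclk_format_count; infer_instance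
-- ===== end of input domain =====

-- B replaces A's three staged passes (delimiter comprehension, join/split width computation,
-- triple-zip concatenation loop) by a direct recursion peeling one field and one alnum run
-- per step, with no intermediate lists; objective: simpler.

-- ===== PORT A =====
def sclk_format_count (fields : List Int) (format : String) : String :=
  let cs := format.toList
  -- delims = [c for c in format if not c.isalnum()] + ['']
  let delims : List (List Char) :=
    (cs.filter (fun c => !(PySem.Chars.isalnum c))).map (fun c => [c]) ++ [[]]
  -- f = "".join([s if s.isalnum() else '/' for s in format])
  let f : List Char := cs.map (fun c => if PySem.Chars.isalnum c then c else '/')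
  -- formats = f.split('/')
  let formats := PySem.Chars.splitOn f ['/']
  -- widths = [len(f) for f in formats]
  let widths := formats.map List.length
  -- count-building loop over zip(delims, widths, fields)
  let count : List Char :=
    (delims.zip (widths.zip fields)).foldl
      (fun count p =>
        let s := PySem.Int.toChars p.2.2
        count ++ (List.replicate (p.2.1 - s.length) '0' ++ s ++ p.1)) []
  String.ofList count

-- ===== PORT B =====
-- the 'while format[i].isalnum(): i += 1' scan of Source B: returns (i, format[i:])
def pvSplitRun : List Char → Nat × List Char
  | [] => (0, [])
  | c :: cs =>
    if PySem.Chars.isalnum c then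
      let p := pvSplitRun cs
      (p.1 + 1, p.2)
    else (0, c :: cs)

-- Source B's recursion, on the character list
def pvGo : List Int → List Char → List Char
  | [], _ => []
  | f :: ft, fmt =>
    let p := pvSplitRun fmt
    let s := PySem.Int.toChars f
    let piece := List.replicate (p.1 - s.length) '0' ++ s
    match p.2 with
    | [] => piece
    | d :: rest => piece ++ d :: pvGo ft rest

def sclk_format_count_alt (fields : List Int) (format : String) : String :=
  String.ofList (pvGo fields format.toList)

-- ===== PRECONDITION & SPEC =====
def Spec_sclk_format_count (fields : List Int) (format : String) (out : String) : Prop := out = sclk_format_count_alt fields format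
instance (fields : List Int) (format : String) (out : String) : Decidable (Spec_sclk_format_count fields format out) := by unfold Spec_sclk_format_count; infer_instance

-- ===== CLAIM =====
def Claim_equal_sclk_format_count : Prop := ∀ (fields : List Int) (format : String), Dom_sclk_format_count fields format → Spec_sclk_format_count fields format (sclk_format_count fields format)

-- ===== LEMMAS AND PROOFS =====

-- prepend `pre` onto the first piece of a split result
def pvConsHead (pre : List Char) : List (List Char) → List (List Char)
  | [] => [pre]
  | h :: t => (pre ++ h) :: t

theorem pvConsHead_consHead (a b : List Char) (X : List (List Char)) :
    pvConsHead a (pvConsHead b X) = pvConsHead (a ++ b) X := by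
  cases X <;> simp [pvConsHead]

theorem pv_go_cons (d c : Char) (rest cur : List Char) (acc : List (List Char)) (m : Nat) :
    PySem.Chars.splitOn.go [d] (m + 1) (c :: rest) cur acc
      = if (d == c) = true then PySem.Chars.splitOn.go [d] m rest [] (cur.reverse :: acc)
        else PySem.Chars.splitOn.go [d] m rest (c :: cur) acc := by
  simp only [PySem.Chars.splitOn.go]
  by_cases hd : (d == c) = true <;> simp [List.isPrefixOf, hd]

theorem pv_splitOn_go_spec (d : Char) :
    ∀ (l : List Char) (fuel : Nat) (cur : List Char) (acc : List (List Char)),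
      l.length < fuel →
      PySem.Chars.splitOn.go [d] fuel l cur acc
        = acc.reverse ++ pvConsHead cur.reverse (PySem.Chars.splitOn l [d]) := by
  intro l
  induction l with
  | nil =>
    intro fuel cur acc h
    match fuel, h with
    | Nat.succ m, _ =>
      simp [PySem.Chars.splitOn.go, PySem.Chars.splitOn, pvConsHead]
  | cons c rest ih =>
    intro fuel cur acc h
    match fuel, h with
    | Nat.succ m, h =>
      have hm : rest.length < m := by simpa using Nat.lt_of_succ_lt_succ h
      have hSP : PySem.Chars.splitOn (c :: rest) [d]
          = if (d == c) = true then [] :: pvConsHead [] (PySem.Chars.splitOn rest [d])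
            else pvConsHead [c] (PySem.Chars.splitOn rest [d]) := by
        show PySem.Chars.splitOn.go [d] ((c :: rest).length + 1) (c :: rest) [] [] = _
        rw [show (c :: rest).length + 1 = rest.length + 1 + 1 by simp]
        rw [pv_go_cons]
        by_cases hd : (d == c) = true
        · simp only [hd, if_true, List.reverse_nil]
          rw [ih (rest.length + 1) [] [[]] (by omega)]
          simp [pvConsHead]
        · simp only [hd]
          rw [ih (rest.length + 1) [c] [] (by omega)]
          simp [pvConsHead]
      rw [pv_go_cons, hSP]
      by_cases hd : (d == c) = true
      · simp only [hd, if_true]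
        rw [ih m [] (cur.reverse :: acc) hm]
        simp [pvConsHead]
      · simp only [hd]
        rw [ih m (c :: cur) acc hm]
        simp only [Bool.false_eq_true, if_false, List.reverse_cons]
        rw [← pvConsHead_consHead]

theorem pv_splitOn_nil (d : Char) : PySem.Chars.splitOn [] [d] = [[]] := by
  simp [PySem.Chars.splitOn, PySem.Chars.splitOn.go]

theorem pv_go_ne_nil (d : Char) :
    ∀ (fuel : Nat) (l cur : List Char) (acc : List (List Char)),
      PySem.Chars.splitOn.go [d] fuel l cur acc ≠ [] := by
  intro fuel
  induction fuel with
  | zero => intro l cur acc; simp [PySem.Chars.splitOn.go]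
  | succ m ih =>
    intro l cur acc
    cases l with
    | nil => simp [PySem.Chars.splitOn.go]
    | cons c rest =>
      rw [pv_go_cons]
      by_cases hd : (d == c) = true
      · simp only [hd, if_true]; exact ih rest [] (cur.reverse :: acc)
      · simp only [hd, Bool.false_eq_true, if_false]; exact ih rest (c :: cur) acc

theorem pv_splitOn_ne_nil (d : Char) (l : List Char) : PySem.Chars.splitOn l [d] ≠ [] :=
  pv_go_ne_nil d (l.length + 1) l [] []

theorem pvConsHead_nil {X : List (List Char)} (h : X ≠ []) : pvConsHead [] X = X := by
  cases X with
  | nil => exact absurd rfl h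
  | cons a t => simp [pvConsHead]

theorem pv_splitOn_cons (d c : Char) (rest : List Char) :
    PySem.Chars.splitOn (c :: rest) [d]
      = if (d == c) = true then [] :: PySem.Chars.splitOn rest [d]
        else pvConsHead [c] (PySem.Chars.splitOn rest [d]) := by
  show PySem.Chars.splitOn.go [d] ((c :: rest).length + 1) (c :: rest) [] [] = _
  rw [show (c :: rest).length + 1 = rest.length + 1 + 1 by simp]
  rw [pv_go_cons]
  by_cases hd : (d == c) = true
  · simp only [hd, if_true, List.reverse_nil]
    rw [pv_splitOn_go_spec d rest (rest.length + 1) [] [[]] (by omega)]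
    simp [pvConsHead_nil (pv_splitOn_ne_nil d rest)]
  · simp only [hd, Bool.false_eq_true, if_false]
    rw [pv_splitOn_go_spec d rest (rest.length + 1) [c] [] (by omega)]
    rfl

-- A's widths and delims as functions of the character list
def pvW (cs : List Char) : List Nat :=
  (PySem.Chars.splitOn (cs.map (fun c => if PySem.Chars.isalnum c then c else '/')) ['/']).map List.length

def pvD (cs : List Char) : List (List Char) :=
  (cs.filter (fun c => !(PySem.Chars.isalnum c))).map (fun c => [c]) ++ [[]]

def pvAddFirst (w : Nat) : List Nat → List Nat
  | [] => []
  | h :: t => (w + h) :: t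

theorem pvW_alnum (c : Char) (rest : List Char) (h : PySem.Chars.isalnum c = true) :
    pvW (c :: rest) = pvAddFirst 1 (pvW rest) := by
  have hne : ('/' == c) = false := by
    apply beq_eq_false_iff_ne.mpr
    intro hc
    rw [← hc] at h
    exact absurd h (by decide)
  unfold pvW
  simp only [List.map_cons, h, if_true]
  rw [pv_splitOn_cons]
  simp only [hne, Bool.false_eq_true, if_false]
  rcases hX : PySem.Chars.splitOn (rest.map (fun c => if PySem.Chars.isalnum c then c else '/')) ['/'] with _ | ⟨h', t⟩
  · exact absurd hX (pv_splitOn_ne_nil _ _)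
  · simp [pvConsHead, pvAddFirst, Nat.add_comm]

theorem pvW_non (c : Char) (rest : List Char) (h : PySem.Chars.isalnum c = false) :
    pvW (c :: rest) = 0 :: pvW rest := by
  unfold pvW
  simp only [List.map_cons, h, Bool.false_eq_true, if_false]
  rw [pv_splitOn_cons]
  simp

theorem pvD_alnum (c : Char) (rest : List Char) (h : PySem.Chars.isalnum c = true) :
    pvD (c :: rest) = pvD rest := by
  simp [pvD, h]

theorem pvD_non (c : Char) (rest : List Char) (h : PySem.Chars.isalnum c = false) :
    pvD (c :: rest) = [c] :: pvD rest := by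
  simp [pvD, h]

-- characterization of B's run scan against A's width/delimiter lists
theorem pvSplitRun_char : ∀ (cs : List Char),
    (match (pvSplitRun cs).2 with
     | [] => pvW cs = [(pvSplitRun cs).1] ∧ pvD cs = [[]]
     | d :: rest => pvW cs = (pvSplitRun cs).1 :: pvW rest ∧ pvD cs = [d] :: pvD rest) := by
  intro cs
  induction cs with
  | nil =>
    simp [pvSplitRun, pvW, pvD, pv_splitOn_nil]
  | cons c rest ih =>
    by_cases hal : PySem.Chars.isalnum c = true
    · have hS : pvSplitRun (c :: rest) = ((pvSplitRun rest).1 + 1, (pvSplitRun rest).2) := by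
        simp [pvSplitRun, hal]
      rw [hS]
      rcases h2 : (pvSplitRun rest).2 with _ | ⟨d, r⟩ <;> rw [h2] at ih
      · simp only
        rw [pvW_alnum c rest hal, pvD_alnum c rest hal, ih.1]
        exact ⟨by simp [pvAddFirst, Nat.add_comm], ih.2⟩
      · simp only
        rw [pvW_alnum c rest hal, pvD_alnum c rest hal, ih.1]
        exact ⟨by simp [pvAddFirst, Nat.add_comm], ih.2⟩
    · have hal' : PySem.Chars.isalnum c = false := by simpa using hal
      have hS : pvSplitRun (c :: rest) = (0, c :: rest) := by
        simp [pvSplitRun, hal']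
      rw [hS]
      exact ⟨pvW_non c rest hal', pvD_non c rest hal'⟩

theorem pv_foldl_append {α : Type} (g : α → List Char) :
    ∀ (l : List α) (init : List Char),
      l.foldl (fun acc x => acc ++ g x) init = init ++ (l.map g).flatten := by
  intro l
  induction l with
  | nil => intro init; simp
  | cons x t ih => intro init; simp [List.foldl_cons, ih]

-- B's recursion equals the flatten of A's per-piece list
theorem pvGo_eq : ∀ (fields : List Int) (cs : List Char),
    pvGo fields cs
      = (((pvD cs).zip ((pvW cs).zip fields)).map (fun p =>
          List.replicate (p.2.1 - (PySem.Int.toChars p.2.2).length) '0'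
            ++ PySem.Int.toChars p.2.2 ++ p.1)).flatten := by
  intro fields
  induction fields with
  | nil => intro cs; simp [pvGo]
  | cons f ft ih =>
    intro cs
    have hc := pvSplitRun_char cs
    rcases h2 : (pvSplitRun cs).2 with _ | ⟨d, rest⟩ <;> rw [h2] at hc
    · rcases hc with ⟨hW, hD⟩
      simp [pvGo, h2, hW, hD]
    · rcases hc with ⟨hW, hD⟩
      simp only [pvGo, h2, hW, hD, List.zip_cons_cons, List.map_cons, List.flatten_cons]
      rw [ih rest]
      simp

-- ===== VERDICT =====
theorem sclk_format_count_spec : Claim_equal_sclk_format_count := by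
  intro fields format _
  show sclk_format_count fields format = sclk_format_count_alt fields format
  simp only [sclk_format_count, sclk_format_count_alt]
  rw [pv_foldl_append, pvGo_eq]
  simp [pvW, pvD]
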